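-- pv_equiv track=rewrite | github.com/eoc940/Python-data_structure-and-algorithm_PS | programmers-algorythm/weekly/four.py | solution
-- ===== SOURCE A (Python) =====
-- from collections import defaultdict
--
-- def solution(table, languages, preference):
--     answer = []
--     table_dict = defaultdict(list)
--     for i in range(len(table)):
--         table[i] = table[i].split()
--         table_dict[table[i][0]] = table[i][1:]
--
--     score_dict = dict()
--     for key, val in table_dict.items():
--         total = 0
--         for idx, lang in enumerate(languages):
--             score = 0
--             if lang in val:
--                 score = len(val) - val.index(lang)
--             total += score * preference[idx]
--         score_dict[key] = total
--
--     max_score = max(score_dict.values())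
--     for key, val in score_dict.items():
--         if val == max_score:
--             answer.append(key)
--
--     answer.sort()
--     return answer[0]
-- ===== SOURCE B (Python) =====
-- def solution(table, languages, preference):
--     # Single selection pass: no score dict, no max/filter/sort pipeline.
--     # (Unlike A, this does not mutate `table` in place.)
--     jobs = {}
--     for row in table:
--         parts = row.split()
--         jobs[parts[0]] = parts[1:]
--     best_key = None
--     best_score = 0
--     for key, val in jobs.items():
--         total = sum((len(val) - val.index(lang)) * p
--                     for lang, p in zip(languages, preference) if lang in val)
--         if best_key is None or total > best_score or (total == best_score and key < best_key):
--             best_key, best_score = key, total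
--     return best_key
-- ===== Notes on version B (the rewrite author's own statement) =====
-- stated objective: alternative
-- what changed: B drops A's build-full-score-dict -> max() -> filter-ties -> sort -> [0] pipeline and instead makes one fused pass over the parsed job dict, computing each job's weighted total inline (zip of languages and preferences instead of enumerate + preference[idx]) and keeping a single running (best_key, best_score) with the alphabetical tie-break applied on the fly.
import Mathlib
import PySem

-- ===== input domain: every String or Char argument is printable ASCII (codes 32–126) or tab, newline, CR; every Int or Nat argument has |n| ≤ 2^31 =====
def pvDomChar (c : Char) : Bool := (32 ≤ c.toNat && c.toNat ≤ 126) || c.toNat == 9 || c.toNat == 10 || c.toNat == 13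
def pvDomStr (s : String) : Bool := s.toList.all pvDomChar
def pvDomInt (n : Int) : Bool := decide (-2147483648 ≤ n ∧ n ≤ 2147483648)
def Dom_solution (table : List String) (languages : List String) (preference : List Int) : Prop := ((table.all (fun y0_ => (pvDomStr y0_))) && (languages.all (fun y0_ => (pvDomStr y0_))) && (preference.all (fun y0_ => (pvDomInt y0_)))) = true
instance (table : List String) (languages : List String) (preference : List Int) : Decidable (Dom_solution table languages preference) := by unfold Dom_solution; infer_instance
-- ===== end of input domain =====

-- B replaces A's build-score-dict → max → filter-ties → sort → [0] pipeline with one fused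
-- selection pass keeping a running (best_key, best_score); A mutates `table` in place and B
-- does not — the equivalence proved here is about the return value only.

-- ===== PORT A =====
def solution (table : List String) (languages : List String) (preference : List Int) : String :=
  let table_dict : PySem.Dict String (List String) :=
    table.foldl (fun d row =>
      let parts := PySem.Str.split₀ row
      d.insert ((PySem.List.pyGet? parts 0).getD "") (PySem.List.slice parts (some 1) none))
      PySem.Dict.empty
  let score_dict : PySem.Dict String Int :=
    table_dict.items.foldl (fun d kv =>
      let total : Int :=
        (PySem.List.enumerate languages).foldl (fun t il =>
          let score : Int :=
            if il.2 ∈ kv.2 then (kv.2.length : Int) - (((PySem.List.index? kv.2 il.2).getD 0 : Nat) : Int)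
            else 0
          t + score * (PySem.List.pyGet? preference il.1).getD 0) 0
      d.insert kv.1 total) PySem.Dict.empty
  let max_score : Int := (PySem.List.max? score_dict.values (fun x => x)).getD 0
  let answer : List String :=
    score_dict.items.foldl (fun a kv => if kv.2 = max_score then a ++ [kv.1] else a) []
  (PySem.List.pyGet? (PySem.List.sorted answer (fun x => x)) 0).getD ""

-- ===== PORT B =====
def solution_alt (table : List String) (languages : List String) (preference : List Int) : String :=
  let jobs : PySem.Dict String (List String) :=
    table.foldl (fun d row =>
      let parts := PySem.Str.split₀ row
      d.insert ((PySem.List.pyGet? parts 0).getD "") (PySem.List.slice parts (some 1) none))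
      PySem.Dict.empty
  let best : Option (String × Int) :=
    jobs.items.foldl (fun b kv =>
      let total : Int :=
        (((languages.zip preference).filter (fun lp => lp.1 ∈ kv.2)).map
          (fun lp => ((kv.2.length : Int) - (((PySem.List.index? kv.2 lp.1).getD 0 : Nat) : Int)) * lp.2)).sum
      match b with
      | none => some (kv.1, total)
      | some (bk, bs) =>
        if total > bs ∨ (total = bs ∧ kv.1 < bk) then some (kv.1, total) else some (bk, bs)) none
  match best with
  | some (bk, _) => bk
  | none => ""  -- Source B returns None here; unreachable under Pre_solution (table ≠ [])

-- ===== PRECONDITION & SPEC =====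
-- Pre_ excludes exactly the inputs where the Python A raises: an empty table (max() of an empty
-- sequence, ValueError), a row that is all whitespace (parts[0], IndexError), and more languages
-- than preference weights (preference[idx], IndexError).
def Pre_solution (table : List String) (languages : List String) (preference : List Int) : Prop :=
  table ≠ [] ∧ (∀ row ∈ table, PySem.Str.split₀ row ≠ []) ∧ languages.length ≤ preference.length
instance (table : List String) (languages : List String) (preference : List Int) : Decidable (Pre_solution table languages preference) := by unfold Pre_solution; infer_instance

def pvWitness_solution : List String × List String × List Int := (["jobA python java", "jobB java"], ["python", "java"], [3, 2])

def Spec_solution (table : List String) (languages : List String) (preference : List Int) (out : String) : Prop := out = solution_alt table languages preference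
instance (table : List String) (languages : List String) (preference : List Int) (out : String) : Decidable (Spec_solution table languages preference out) := by unfold Spec_solution; infer_instance

-- ===== CLAIM (what is proved, stated in full; the proofs are below) =====
def Claim_equal_solution : Prop := ∀ (table : List String) (languages : List String) (preference : List Int), Dom_solution table languages preference → Pre_solution table languages preference → Spec_solution table languages preference (solution table languages preference)
-- ===== LEMMAS AND PROOFS =====

-- A's inner scoring loop (enumerate + preference[idx]) equals B's zip-filter-map sum.
theorem pv_total_eq (val : List String) :
    ∀ (ls : List String) (pref : List Int) (k : Nat) (t : Int),
      k + ls.length ≤ pref.length →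
      (PySem.List.enumerate ls (k : Int)).foldl (fun t il =>
          t + (if il.2 ∈ val then (val.length : Int) - (((PySem.List.index? val il.2).getD 0 : Nat) : Int)
               else 0) * (PySem.List.pyGet? pref il.1).getD 0) t
        = t + (((ls.zip (pref.drop k)).filter (fun lp => lp.1 ∈ val)).map
            (fun lp => ((val.length : Int) - (((PySem.List.index? val lp.1).getD 0 : Nat) : Int)) * lp.2)).sum := by
  intro ls
  induction ls with
  | nil => intro pref k t h; simp [PySem.List.enumerate]
  | cons l ls ih =>
    intro pref k t h
    have hk : k < pref.length := by simp at h; omega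
    have hdrop : pref.drop k = pref[k] :: pref.drop (k+1) := List.drop_eq_getElem_cons hk
    have hcons : PySem.List.enumerate (l::ls) (k:Int) = ((k:Int),l) :: PySem.List.enumerate ls ((k:Int)+1) := by
      simp [PySem.List.enumerate]
    rw [hcons]
    simp only [List.foldl_cons]
    have hcast : ((k:Int)+1) = (((k+1 : Nat)) : Int) := by push_cast; ring
    rw [hcast, ih pref (k+1) _ (by simp at h ⊢; omega), hdrop, List.zip_cons_cons, List.filter_cons]
    have hget : (PySem.List.pyGet? pref (k:Int)).getD 0 = pref[k] := by
      simp [pysem, hk]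
    rw [hget]
    by_cases hm : l ∈ val
    · simp [hm]; ring
    · simp [hm]

-- characterisation of B's running-best fold
theorem pv_runbest (P : List (String × Int)) :
    ∀ (bk : String) (bs : Int), ∃ bk' bs',
      P.foldl (fun b kv =>
          match b with
          | none => some (kv.1, kv.2)
          | some (bk, bs) => if kv.2 > bs ∨ (kv.2 = bs ∧ kv.1 < bk) then some (kv.1, kv.2) else some (bk, bs))
        (some (bk, bs))
        = some (bk', bs') ∧
      ((bk', bs') = (bk, bs) ∨ (bk', bs') ∈ P) ∧
      bs ≤ bs' ∧ (∀ kv ∈ P, kv.2 ≤ bs') ∧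
      (bs' = bs → bk' ≤ bk) ∧ (∀ kv ∈ P, kv.2 = bs' → bk' ≤ kv.1) := by
  induction P with
  | nil =>
    intro bk bs
    exact ⟨bk, bs, rfl, Or.inl rfl, le_refl _, by simp, fun _ => le_refl _, by simp⟩
  | cons kv P ih =>
    intro bk bs
    simp only [List.foldl_cons]
    by_cases hc : kv.2 > bs ∨ (kv.2 = bs ∧ kv.1 < bk)
    · rw [if_pos hc]
      obtain ⟨bk', bs', heq, hmem, hle, hub, hmin, hminall⟩ := ih kv.1 kv.2
      refine ⟨bk', bs', heq, ?_, ?_, ?_, ?_, ?_⟩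
      · rcases hmem with h | h
        · exact Or.inr (by rw [h]; exact List.mem_cons_self)
        · exact Or.inr (List.mem_cons_of_mem _ h)
      · rcases hc with h | ⟨h1, _⟩
        · exact le_of_lt (lt_of_lt_of_le h hle)
        · omega
      · intro x hx
        rcases List.mem_cons.mp hx with h | h
        · subst h; exact hle
        · exact hub x h
      · intro hbs
        rcases hc with h | ⟨h1, h2⟩
        · have h3 : bs < bs' := lt_of_lt_of_le h hle
          omega
        · exact le_trans (hmin (by rw [hbs, h1])) (le_of_lt h2)
      · intro x hx hxv
        rcases List.mem_cons.mp hx with h | h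
        · subst h; exact hmin hxv.symm
        · exact hminall x h hxv
    · rw [if_neg hc]
      push Not at hc
      obtain ⟨hle1, hle2⟩ := hc
      obtain ⟨bk', bs', heq, hmem, hle, hub, hmin, hminall⟩ := ih bk bs
      refine ⟨bk', bs', heq, ?_, hle, ?_, hmin, ?_⟩
      · rcases hmem with h | h
        · exact Or.inl h
        · exact Or.inr (List.mem_cons_of_mem _ h)
      · intro x hx
        rcases List.mem_cons.mp hx with h | h
        · subst h; omega
        · exact hub x h
      · intro x hx hxv
        rcases List.mem_cons.mp hx with h | h
        · subst h
          have hbseq : bs' = bs := le_antisymm (by omega) hle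
          have : bk ≤ x.1 := hle2 (by omega)
          exact le_trans (hmin hbseq) this
        · exact hminall x h hxv

-- head of A's sorted tie list = B's running best (the minimal key among maximal pairs)
theorem pv_select_eq (P : List (String × Int)) (hne : P ≠ []) :
    (PySem.List.pyGet? (PySem.List.sorted
        (P.foldl (fun a kv => if kv.2 = (PySem.List.max? (P.map Prod.snd) (fun x => x)).getD 0
                              then a ++ [kv.1] else a) [])
        (fun x => x)) 0).getD ""
    = (match P.foldl (fun b kv =>
          match b with
          | none => some (kv.1, kv.2)
          | some (bk, bs) => if kv.2 > bs ∨ (kv.2 = bs ∧ kv.1 < bk) then some (kv.1, kv.2) else some (bk, bs))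
          none with
       | some (bk, _) => bk
       | none => "") := by
  obtain ⟨kv0, rest, rfl⟩ := List.exists_cons_of_ne_nil hne
  obtain ⟨bk', bs', heq, hmem, hle, hub, hmin, hminall⟩ := pv_runbest rest kv0.1 kv0.2
  have hfold : (kv0 :: rest).foldl (fun b kv =>
          match b with
          | none => some (kv.1, kv.2)
          | some (bk, bs) => if kv.2 > bs ∨ (kv.2 = bs ∧ kv.1 < bk) then some (kv.1, kv.2) else some (bk, bs))
          none = some (bk', bs') := by
    rw [List.foldl_cons]; exact heq
  rw [hfold]
  have hmemP : (bk', bs') ∈ kv0 :: rest := by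
    rcases hmem with h | h
    · rw [h]; exact List.mem_cons_self
    · exact List.mem_cons_of_mem _ h
  have hubP : ∀ kv ∈ kv0 :: rest, kv.2 ≤ bs' := by
    intro kv hkv
    rcases List.mem_cons.mp hkv with h | h
    · rw [h]; exact hle
    · exact hub kv h
  have hminP : ∀ kv ∈ kv0 :: rest, kv.2 = bs' → bk' ≤ kv.1 := by
    intro kv hkv hv
    rcases List.mem_cons.mp hkv with h | h
    · rw [h]; exact hmin (by rw [← hv, h])
    · exact hminall kv h hv
  obtain ⟨m, hM⟩ : ∃ m, PySem.List.max? ((kv0 :: rest).map Prod.snd) (fun x => x) = some m := by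
    cases hM : PySem.List.max? ((kv0 :: rest).map Prod.snd) (fun x => x) with
    | none => exact absurd ((PySem.List.max?_eq_none_iff _ _).mp hM) (by simp)
    | some m => exact ⟨m, rfl⟩
  have hmbs : m = bs' := by
    have h1 : m ∈ (kv0 :: rest).map Prod.snd := PySem.List.max?_mem hM
    obtain ⟨kv, hkv, hkv2⟩ := List.mem_map.mp h1
    have h2 : bs' ≤ m := PySem.List.max?_isMax hM bs' (List.mem_map.mpr ⟨(bk', bs'), hmemP, rfl⟩)
    have h3 : m ≤ bs' := hkv2 ▸ hubP kv hkv
    omega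
  have hM' : (PySem.List.max? ((kv0 :: rest).map Prod.snd) (fun x => x)).getD 0 = bs' := by
    rw [hM]; simpa using hmbs
  simp only [hM']
  rw [PySem.List.foldl_append_ite (p := fun kv : String × Int => kv.2 = bs') (f := Prod.fst)]
  simp only [List.nil_append]
  set ans := (List.filter (fun kv => decide (kv.2 = bs')) (kv0 :: rest)).map Prod.fst with hans
  have hbk'ans : bk' ∈ ans := by
    refine List.mem_map.mpr ⟨(bk', bs'), List.mem_filter.mpr ⟨hmemP, by simp⟩, rfl⟩
  have hansmin : ∀ x ∈ ans, bk' ≤ x := by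
    intro x hx
    obtain ⟨kv, hkv, rfl⟩ := List.mem_map.mp hx
    have := List.mem_filter.mp hkv
    exact hminP kv this.1 (by simpa using this.2)
  have hperm := PySem.List.sorted_perm ans (fun x : String => x) false
  have hpair := PySem.List.sorted_pairwise ans (fun x : String => x)
  have hSne : PySem.List.sorted ans (fun x : String => x) ≠ [] := by
    intro h
    have := hperm.length_eq
    rw [h] at this
    have hnil : ans = [] := List.eq_nil_iff_length_eq_zero.mpr this.symm
    rw [hnil] at hbk'ans
    exact absurd hbk'ans (List.not_mem_nil)
  obtain ⟨h, t, hS⟩ := List.exists_cons_of_ne_nil hSne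
  rw [hS]
  have hget : (PySem.List.pyGet? (h :: t) 0).getD "" = h := by
    simp [PySem.List.pyGet?, PySem.List.pyIdx?]
  rw [hget]
  have hhans : h ∈ ans := by
    rw [← hperm.mem_iff, hS]; exact List.mem_cons_self
  have h1 : bk' ≤ h := hansmin h hhans
  have h2 : h ≤ bk' := by
    have : bk' ∈ h :: t := by rw [← hS, hperm.mem_iff]; exact hbk'ans
    rcases List.mem_cons.mp this with hh | hh
    · exact le_of_eq hh.symm
    · rw [hS] at hpair
      exact (List.pairwise_cons.mp hpair).1 bk' hh
  exact le_antisymm h2 h1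

-- the two pipelines agree on any parsed dictionary with Nodup keys
theorem pv_main (td : PySem.Dict String (List String))
    (fA fB : String × List String → Int) (hf : ∀ kv, fA kv = fB kv)
    (hnd : td.keys.Nodup) (hne : td.items ≠ []) :
    (PySem.List.pyGet? (PySem.List.sorted
      ((td.items.foldl (fun d kv => d.insert kv.1 (fA kv)) PySem.Dict.empty).items.foldl
        (fun a kv => if kv.2 = (PySem.List.max?
            ((td.items.foldl (fun d kv => d.insert kv.1 (fA kv)) PySem.Dict.empty).values
            : List Int) (fun x => x)).getD 0
          then a ++ [kv.1] else a) [])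
      (fun x => x)) 0).getD ""
    = (match td.items.foldl (fun b kv =>
        match b with
        | none => some (kv.1, fB kv)
        | some (bk, bs) =>
          if fB kv > bs ∨ (fB kv = bs ∧ kv.1 < bk) then some (kv.1, fB kv) else some (bk, bs)) none with
       | some (bk, _) => bk
       | none => "") := by
  have hnd' : (td.items.map Prod.fst).Nodup := hnd
  have hsi : (td.items.foldl (fun d kv => d.insert kv.1 (fA kv)) PySem.Dict.empty).items
      = td.items.map (fun kv => (kv.1, fA kv)) := by
    have := PySem.Dict.items_foldl_insert_fresh td.items (fun kv : String × List String => kv.1)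
      fA PySem.Dict.empty (fun a _ => PySem.Dict.contains_empty _) hnd'
    simpa using this
  simp only [hf] at hsi ⊢
  simp only [PySem.Dict.values, hsi]
  rw [pv_select_eq (td.items.map (fun kv => (kv.1, fB kv))) (by simpa using hne)]
  rw [List.foldl_map]

-- ===== VERDICT (by name: the statement is the Claim_ definition above) =====
set_option maxHeartbeats 2000000 in
theorem solution_spec : Claim_equal_solution := by
  intro table languages preference _ hpre
  obtain ⟨htne, hrows, hlen⟩ := hpre
  unfold Spec_solution solution solution_alt
  have htot : ∀ kv : String × List String,
      (PySem.List.enumerate languages).foldl (fun t il =>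
          t + (if il.2 ∈ kv.2 then (kv.2.length : Int) - (((PySem.List.index? kv.2 il.2).getD 0 : Nat) : Int)
               else 0) * (PySem.List.pyGet? preference il.1).getD 0) 0
      = (((languages.zip preference).filter (fun lp => lp.1 ∈ kv.2)).map
          (fun lp => ((kv.2.length : Int) - (((PySem.List.index? kv.2 lp.1).getD 0 : Nat) : Int)) * lp.2)).sum := by
    intro kv
    have := pv_total_eq kv.2 languages preference 0 0 (by omega)
    simpa using this
  have hnd : (table.foldl (fun d row =>
      let parts := PySem.Str.split₀ row
      d.insert ((PySem.List.pyGet? parts 0).getD "") (PySem.List.slice parts (some 1) none))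
      PySem.Dict.empty).keys.Nodup :=
    PySem.Dict.nodup_keys_foldl_insert_key table
      (fun row => (PySem.List.pyGet? (PySem.Str.split₀ row) 0).getD "")
      (fun _ row => PySem.List.slice (PySem.Str.split₀ row) (some 1) none)
      PySem.Dict.empty PySem.Dict.nodup_keys_empty
  have hkeys : (table.foldl (fun d row =>
      let parts := PySem.Str.split₀ row
      d.insert ((PySem.List.pyGet? parts 0).getD "") (PySem.List.slice parts (some 1) none))
      PySem.Dict.empty).keys
      = PySem.Set.ofList (table.map (fun row => (PySem.List.pyGet? (PySem.Str.split₀ row) 0).getD "")) := by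
    have := PySem.Dict.keys_foldl_insert_key table
      (fun row => (PySem.List.pyGet? (PySem.Str.split₀ row) 0).getD "")
      (fun _ row => PySem.List.slice (PySem.Str.split₀ row) (some 1) none)
      (PySem.Dict.empty : PySem.Dict String (List String))
    rw [this, PySem.Dict.keys_empty, PySem.Set.ofList_eq_foldl]
    rfl
  have hkne : (table.foldl (fun d row =>
      let parts := PySem.Str.split₀ row
      d.insert ((PySem.List.pyGet? parts 0).getD "") (PySem.List.slice parts (some 1) none))
      PySem.Dict.empty).keys ≠ [] := by
    rw [hkeys]
    intro h0
    obtain ⟨r, ts, rfl⟩ := List.exists_cons_of_ne_nil htne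
    have hmem : (PySem.List.pyGet? (PySem.Str.split₀ r) 0).getD "" ∈
        PySem.Set.ofList ((r :: ts).map (fun row => (PySem.List.pyGet? (PySem.Str.split₀ row) 0).getD "")) :=
      (PySem.Set.mem_ofList _ _).mpr (by simp)
    rw [h0] at hmem
    exact absurd hmem (List.not_mem_nil)
  have hne : (table.foldl (fun d row =>
      let parts := PySem.Str.split₀ row
      d.insert ((PySem.List.pyGet? parts 0).getD "") (PySem.List.slice parts (some 1) none))
      PySem.Dict.empty).items ≠ [] := by
    intro h0
    apply hkne
    show (table.foldl (fun d row =>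
      let parts := PySem.Str.split₀ row
      d.insert ((PySem.List.pyGet? parts 0).getD "") (PySem.List.slice parts (some 1) none))
      PySem.Dict.empty).items.map Prod.fst = []
    rw [h0]; rfl
  apply pv_main
  · exact htot
  · exact hnd
  · exact hne
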